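-- pv_equiv track=rewrite | github.com/radavies/AdventOfCode2021 | tenth.py | score_errors
-- ===== SOURCE A (Python) =====
-- def score_errors(errors):
--     score = 0
--     for error in errors:
--         if error == ')':
--             score += 3
--         elif error == ']':
--             score += 57
--         elif error == '}':
--             score += 1197
--         else:
--             score += 25137
--     return score
-- ===== SOURCE B (Python) =====
-- def score_errors(errors):
--     errors = list(errors)
--     p = errors.count(')')
--     b = errors.count(']')
--     c = errors.count('}')
--     return 3 * p + 57 * b + 1197 * c + 25137 * (len(errors) - p - b - c)
-- ===== Notes on version B (the rewrite author's own statement) =====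
-- stated objective: alternative
-- what changed: Replaced the per-element if/elif accumulation loop with a count-then-arithmetic decomposition: count the three known bracket characters once and compute the score as a closed-form linear combination, charging 25137 to all remaining elements via length minus the known counts.
import Mathlib
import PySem

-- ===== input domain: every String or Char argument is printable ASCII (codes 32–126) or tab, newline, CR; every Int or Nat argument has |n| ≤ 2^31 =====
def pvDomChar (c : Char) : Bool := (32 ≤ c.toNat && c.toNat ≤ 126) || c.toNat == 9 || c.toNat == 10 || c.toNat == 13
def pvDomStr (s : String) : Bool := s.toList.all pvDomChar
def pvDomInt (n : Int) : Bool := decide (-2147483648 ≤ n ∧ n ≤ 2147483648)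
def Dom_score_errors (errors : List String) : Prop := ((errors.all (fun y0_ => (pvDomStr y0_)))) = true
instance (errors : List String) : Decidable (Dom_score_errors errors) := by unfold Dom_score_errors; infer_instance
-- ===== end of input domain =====

-- B replaces the per-element if/elif loop with counting the three bracket chars once and a closed-form linear combination (alternative decomposition, same cost).


-- ===== PORT A =====
def score_errors (errors : List String) : Int :=
  errors.foldl (fun score error =>
    if error = ")" then score + 3
    else if error = "]" then score + 57
    else if error = "}" then score + 1197
    else score + 25137) 0

-- ===== PORT B =====
def score_errors_alt (errors : List String) : Int :=
  let p : Int := PySem.List.count errors ")"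
  let b : Int := PySem.List.count errors "]"
  let c : Int := PySem.List.count errors "}"
  3 * p + 57 * b + 1197 * c + 25137 * ((errors.length : Int) - p - b - c)

-- ===== PRECONDITION & SPEC =====
def Spec_score_errors (errors : List String) (out : Int) : Prop := out = score_errors_alt errors
instance (errors : List String) (out : Int) : Decidable (Spec_score_errors errors out) := by unfold Spec_score_errors; infer_instance

-- ===== CLAIM (what is proved, stated in full; the proofs are below) =====
def Claim_equal_score_errors : Prop := ∀ (errors : List String), Dom_score_errors errors → Spec_score_errors errors (score_errors errors)

-- ===== LEMMAS AND PROOFS =====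

theorem score_errors_foldl_closed (errors : List String) (s : Int) :
    errors.foldl (fun score error =>
      if error = ")" then score + 3
      else if error = "]" then score + 57
      else if error = "}" then score + 1197
      else score + 25137) s = s + score_errors_alt errors := by
  induction errors generalizing s with
  | nil => simp [score_errors_alt]
  | cons x xs ih =>
    simp only [List.foldl_cons, ih, score_errors_alt, PySem.List.count, List.count_cons,
      List.length_cons, beq_iff_eq]
    split_ifs <;> simp_all <;> ring

-- ===== VERDICT (by name: the statement is the Claim_ definition above) =====
theorem score_errors_spec : Claim_equal_score_errors := by
  intro errors _
  unfold Spec_score_errors score_errors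
  rw [score_errors_foldl_closed]
  ring
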